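-- pv_equiv track=rewrite | github.com/gereleth/aoc_python | src/year2024/day19.py | part2
-- ===== SOURCE A (Python) =====
-- from collections import Counter, defaultdict
-- from typing import Iterator
--
-- class PentacolorTree:
--     def __init__(self):
--         self.is_leaf = False
--         self.children = defaultdict(PentacolorTree)
--
--     def put(self, value: str) -> None:
--         """Add a towel to the tree"""
--         if len(value) == 0:
--             self.is_leaf = True
--         else:
--             child = self.children[value[0]]
--             child.put(value[1:])
--
--     def get_splits(self, value: str) -> Iterator[tuple[str, str]]:
--         """Splits string into `towel+rest` for all towels that fit"""
--         tree = self
--         for i, char in enumerate(value):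
--             if char not in tree.children:
--                 break
--             tree = tree.children[char]
--             if tree.is_leaf:
--                 yield value[: i + 1], value[i + 1 :]
--
-- def parse_input(text_input: str):
--     towels, designs = text_input.split("\n\n")
--     towels = towels.split(", ")
--     # index towels into a tree structure
--     towels_tree = PentacolorTree()
--     for towel in towels:
--         towels_tree.put(towel)
--     designs = designs.split()
--     return towels_tree, designs
--
-- def part2(text_input: str) -> int:
--     towels_tree, designs = parse_input(text_input)
--     total = 0
--
--     ways = Counter()
--     ways[""] = 1
--     # same as part1 but collect counts and can't break early
--     for design in designs:
--         for i in range(1, len(design) + 1):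
--             tail = design[-i:]
--             if tail in ways:
--                 continue
--             for _, rest in towels_tree.get_splits(tail):
--                 ways[tail] += ways[rest]
--         total += ways[design]
--     return total
-- ===== SOURCE B (Python) =====
-- def part2(text_input: str) -> int:
--     towel_part, design_part = text_input.split("\n\n")
--     towels = set(towel_part.split(", "))
--     lengths = sorted({len(t) for t in towels})
--     total = 0
--     for design in design_part.split():
--         n = len(design)
--         dp = [1] + [0] * n
--         for j in range(1, n + 1):
--             dp[j] = sum(dp[j - L] for L in lengths
--                         if L <= j and design[j - L:j] in towels)
--         total += dp[n]
--     return total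
-- ===== Notes on version B (the rewrite author's own statement) =====
-- stated objective: simpler
-- what changed: Replaces the trie plus the suffix-keyed shared Counter memo (negative-slice tails, generator of splits) by a plain per-design forward DP over positions: dp[j] sums dp[j-L] over the distinct towel lengths L whose ending substring is in a towel set.
import Mathlib
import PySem

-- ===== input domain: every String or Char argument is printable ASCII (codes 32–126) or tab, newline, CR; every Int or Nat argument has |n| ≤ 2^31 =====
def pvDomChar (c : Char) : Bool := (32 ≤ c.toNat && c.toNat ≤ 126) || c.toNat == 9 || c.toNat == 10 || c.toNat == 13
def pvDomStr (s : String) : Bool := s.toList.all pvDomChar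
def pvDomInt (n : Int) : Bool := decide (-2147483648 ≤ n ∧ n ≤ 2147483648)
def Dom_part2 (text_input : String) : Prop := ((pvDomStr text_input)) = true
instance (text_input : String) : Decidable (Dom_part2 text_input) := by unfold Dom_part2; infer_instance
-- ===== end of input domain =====

-- B replaces A's trie + shared suffix-keyed Counter memo by a plain per-design forward DP
-- over end positions using a towel set and the distinct towel lengths (objective: simpler).

-- ===== PORT A =====
-- PentacolorTree: a node is (is_leaf, children); children are an (explicit, single-inductive)
-- association list of (char, child_is_leaf, child_children); defaultdict keys are unique.
inductive PNode where
  | nil : PNode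
  | cons : Char → Bool → PNode → PNode → PNode

abbrev PTree := Bool × PNode

def pnFind : PNode → Char → Option PTree
  | .nil, _ => none
  | .cons c' lb ln rest, c => if c' = c then some (lb, ln) else pnFind rest c

mutual
-- PentacolorTree.put
def ptPut : PTree → List Char → PTree
  | (_, n), [] => (true, n)
  | (b, n), c :: cs => (b, pnPut n c cs)
  termination_by t s => (s.length, sizeOf t.2 + 1)
-- child = self.children[value[0]] (created if absent); child.put(value[1:])
def pnPut : PNode → Char → List Char → PNode
  | .nil, c, cs =>
      let child := ptPut (false, .nil) cs
      .cons c child.1 child.2 .nil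
  | .cons c' lb ln rest, c, cs =>
      if c' = c then
        let child := ptPut (lb, ln) cs
        .cons c' child.1 child.2 rest
      else .cons c' lb ln (pnPut rest c cs)
  termination_by n c cs => (cs.length + 1, sizeOf n)
end

-- get_splits as a list: descend char by char, yield (value[:i+1], value[i+1:]) at leaves, stop when no child.
def ptSplits : PTree → List Char → List Char → List (List Char × List Char)
  | _, _, [] => []
  | (_, n), pre, c :: cs =>
    match pnFind n c with
    | none => []
    | some t' => (if t'.1 then [(pre ++ [c], cs)] else []) ++ ptSplits t' (pre ++ [c]) cs
  termination_by _ _ v => v.length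

def part2 (text_input : String) : Int :=
  let parts := (PySem.Str.split? text_input "\n\n").getD []
  let towelsStr := parts.getD 0 ""
  let designsStr := parts.getD 1 ""
  let towels := (PySem.Str.split? towelsStr ", ").getD []
  let towelsTree := towels.foldl (fun tr t => ptPut tr t.toList) ((false, .nil) : PTree)
  let designs := PySem.Str.split₀ designsStr
  let init : PySem.Dict String Int := (PySem.Dict.empty).insert "" 1
  let res := designs.foldl (fun (acc : Int × PySem.Dict String Int) design =>
      let ways := (PySem.List.pyRange 1 (PySem.Str.len design + 1) 1).foldl
        (fun (m : PySem.Dict String Int) i =>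
          let tail := PySem.Str.slice design (some (-i)) none
          if m.contains tail then m
          else (ptSplits towelsTree [] tail.toList).foldl
                 (fun m2 pr => m2.modify tail 0 (fun x => x + m2.getD (String.ofList pr.2) 0)) m)
        acc.2
      (acc.1 + ways.getD design 0, ways))
    (0, init)
  res.1

-- ===== PORT B =====
def part2_alt (text_input : String) : Int :=
  let parts := (PySem.Str.split? text_input "\n\n").getD []
  let towelPart := parts.getD 0 ""
  let designPart := parts.getD 1 ""
  let towels : PySem.Set String := PySem.Set.ofList ((PySem.Str.split? towelPart ", ").getD [])
  let lengths : List Int := PySem.List.sorted (PySem.Set.ofList (towels.map (fun t => PySem.Str.len t))) (fun L => L)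
  (PySem.Str.split₀ designPart).foldl (fun total design =>
    let n := PySem.Str.len design
    let dp : List Int := [1] ++ List.replicate n.toNat 0
    let dp := (PySem.List.pyRange 1 (n + 1) 1).foldl (fun dp j =>
        PySem.List.pySetD dp j
          (lengths.foldl (fun s L =>
              if L ≤ j && PySem.Set.contains towels (PySem.Str.slice design (some (j - L)) (some j))
              then s + PySem.List.pyGetD dp (j - L) 0 else s) 0))
      dp
    total + PySem.List.pyGetD dp n 0) 0

-- ===== PRECONDITION & SPEC =====
-- Pre_ excludes exactly the inputs where A raises: text_input.split("\n\n") must have exactly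
-- two pieces, otherwise the unpacking `towels, designs = ...` raises ValueError (B raises there too).
def Pre_part2 (text_input : String) : Prop :=
  ((PySem.Str.split? text_input "\n\n").getD []).length = 2
instance (text_input : String) : Decidable (Pre_part2 text_input) := by unfold Pre_part2; infer_instance

def pvWitness_part2 : String := "r, b\n\nrb br"

def Spec_part2 (text_input : String) (out : Int) : Prop := out = part2_alt text_input
instance (text_input : String) (out : Int) : Decidable (Spec_part2 text_input out) := by unfold Spec_part2; infer_instance

-- ===== CLAIM (what is proved, stated in full; the proofs are below) =====
def Claim_equal_part2 : Prop := ∀ (text_input : String), Dom_part2 text_input → Pre_part2 text_input → Spec_part2 text_input (part2 text_input)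

-- ===== LEMMAS AND PROOFS =====


def decompsF (S : List (List Char)) (s : List Char) : List (List (List Char)) :=
  if s = [] then [[]]
  else (List.range s.length).attach.flatMap (fun k =>
      if s.take (k.1+1) ∈ S then (decompsF S (s.drop (k.1+1))).map (fun d => s.take (k.1+1) :: d) else [])
  termination_by s.length
  decreasing_by
    rename_i h _
    have h1 : 0 < s.length := List.length_pos_iff.mpr h
    simp; omega

def decompsL (S : List (List Char)) (s : List Char) : List (List (List Char)) :=
  if s = [] then [[]]
  else (List.range s.length).attach.flatMap (fun k =>
      if s.drop (s.length - (k.1+1)) ∈ S then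
        (decompsL S (s.take (s.length - (k.1+1)))).map (fun d => d ++ [s.drop (s.length - (k.1+1))]) else [])
  termination_by s.length
  decreasing_by
    rename_i h _
    have h1 : 0 < s.length := List.length_pos_iff.mpr h
    simp; omega

def IsDecomp (S : List (List Char)) (s : List Char) (d : List (List Char)) : Prop :=
  d.flatten = s ∧ ∀ p ∈ d, p ∈ S ∧ p ≠ []

theorem isDecomp_nil (S : List (List Char)) (d : List (List Char)) :
    IsDecomp S [] d ↔ d = [] := by
  constructor
  · rintro ⟨h1, h2⟩
    cases d with
    | nil => rfl
    | cons p d' =>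
      exfalso
      have hp := h2 p (by simp)
      exact hp.2 (List.flatten_eq_nil_iff.mp h1 p (by simp))
  · rintro rfl; exact ⟨rfl, by simp⟩

theorem mem_decompsF (S : List (List Char)) :
    ∀ (n : Nat) (s : List Char), s.length ≤ n → ∀ d, (d ∈ decompsF S s ↔ IsDecomp S s d) := by
  intro n
  induction n with
  | zero =>
    intro s hs d
    have : s = [] := List.eq_nil_of_length_eq_zero (Nat.le_zero.mp hs)
    subst this
    rw [decompsF]
    simp [isDecomp_nil]
  | succ n ih =>
    intro s hs d
    by_cases hnil : s = []
    · subst hnil; exact ih [] (by simp) d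
    rw [decompsF, if_neg hnil]
    simp only [List.mem_flatMap, List.mem_attach, true_and]
    constructor
    · rintro ⟨⟨k, hk0⟩, hd⟩
      have hk : k < s.length := List.mem_range.mp hk0
      split at hd
      · rename_i hmem
        simp only at hmem
        simp only [List.mem_map] at hd
        obtain ⟨d', hd', rfl⟩ := hd
        have hlen : (s.drop (k+1)).length ≤ n := by simp; omega
        obtain ⟨hflat, hparts⟩ := (ih _ hlen d').mp hd'
        refine ⟨by simp [hflat], ?_⟩
        intro p hp
        rcases List.mem_cons.mp hp with rfl | hp
        · refine ⟨hmem, ?_⟩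
          have hl : (s.take (k+1)).length = k+1 := by simp; omega
          intro hnilp; rw [hnilp] at hl; simp at hl
        · exact hparts p hp
      · simp at hd
    · rintro ⟨hflat, hparts⟩
      cases d with
      | nil => exact absurd (by simpa using hflat.symm) hnil
      | cons p d' =>
        have hp := hparts p (by simp)
        have hpre : p <+: s := ⟨d'.flatten, by simpa using hflat⟩
        have hplen : 1 ≤ p.length := List.length_pos_iff.mpr hp.2
        have hple : p.length ≤ s.length := hpre.length_le
        refine ⟨⟨p.length - 1, List.mem_range.mpr (by omega)⟩, ?_⟩
        have hk1 : p.length - 1 + 1 = p.length := by omega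
        have htake : s.take p.length = p := (List.prefix_iff_eq_take.mp hpre).symm
        have hdrop : d'.flatten = s.drop p.length := by
          have := hflat
          simp only [List.flatten_cons] at this
          have h2 := congrArg (List.drop p.length) this
          simpa using h2
        simp only [hk1, htake]
        rw [if_pos hp.1]
        simp only [List.mem_map]
        refine ⟨d', ?_, rfl⟩
        have hlen : (s.drop p.length).length ≤ n := by simp; omega
        exact (ih _ hlen d').mpr ⟨hdrop, fun q hq => hparts q (by simp [hq])⟩

theorem mem_decompsL (S : List (List Char)) :
    ∀ (n : Nat) (s : List Char), s.length ≤ n → ∀ d, (d ∈ decompsL S s ↔ IsDecomp S s d) := by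
  intro n
  induction n with
  | zero =>
    intro s hs d
    have : s = [] := List.eq_nil_of_length_eq_zero (Nat.le_zero.mp hs)
    subst this
    rw [decompsL]
    simp [isDecomp_nil]
  | succ n ih =>
    intro s hs d
    by_cases hnil : s = []
    · subst hnil; exact ih [] (by simp) d
    rw [decompsL, if_neg hnil]
    simp only [List.mem_flatMap, List.mem_attach, true_and]
    constructor
    · rintro ⟨⟨k, hk0⟩, hd⟩
      have hk : k < s.length := List.mem_range.mp hk0
      split at hd
      · rename_i hmem
        simp only at hmem
        simp only [List.mem_map] at hd
        obtain ⟨d', hd', rfl⟩ := hd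
        have hlen : (s.take (s.length - (k+1))).length ≤ n := by simp; omega
        obtain ⟨hflat, hparts⟩ := (ih _ hlen d').mp hd'
        refine ⟨by simp [hflat], ?_⟩
        intro p hp
        rcases List.mem_append.mp hp with hp | hp
        · exact hparts p hp
        · simp only [List.mem_singleton] at hp
          subst hp
          refine ⟨hmem, ?_⟩
          have hl : (s.drop (s.length - (k+1))).length = k+1 := by simp; omega
          intro hnilp; rw [hnilp] at hl; simp at hl
      · simp at hd
    · rintro ⟨hflat, hparts⟩
      rcases List.eq_nil_or_concat d with rfl | ⟨d', p, rfl⟩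
      · exact absurd (by simpa using hflat.symm) hnil
      · simp only [List.concat_eq_append] at hflat hparts ⊢
        have hp := hparts p (by simp)
        have hsuf : p <:+ s := ⟨d'.flatten, by simpa using hflat⟩
        have hplen : 1 ≤ p.length := List.length_pos_iff.mpr hp.2
        have hple : p.length ≤ s.length := hsuf.length_le
        refine ⟨⟨p.length - 1, List.mem_range.mpr (by omega)⟩, ?_⟩
        have hk1 : p.length - 1 + 1 = p.length := by omega
        have hdropv : s.drop (s.length - p.length) = p := by
          have := List.suffix_iff_eq_drop.mp hsuf
          exact this.symm
        have h0 : d'.flatten ++ p = s := by simpa using hflat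
        have hlh : d'.flatten.length + p.length = s.length := by
          have := congrArg List.length h0; simpa using this
        have htakev : d'.flatten = s.take (s.length - p.length) := by
          have h2 := congrArg (List.take d'.flatten.length) h0
          rw [List.take_append_of_le_length le_rfl, List.take_length] at h2
          rw [show s.length - p.length = d'.flatten.length from by omega]
          exact h2
        simp only [hk1, hdropv]
        rw [if_pos hp.1]
        simp only [List.mem_map]
        refine ⟨d', ?_, rfl⟩
        have hlen : (s.take (s.length - p.length)).length ≤ n := by simp; omega
        exact (ih _ hlen d').mpr ⟨htakev, fun q hq => hparts q (by simp [hq])⟩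

theorem head?_mem_decompsF_branch (S : List (List Char)) (s : List Char) (k : Nat)
    (d : List (List Char))
    (hd : d ∈ (if s.take (k+1) ∈ S then (decompsF S (s.drop (k+1))).map (fun d => s.take (k+1) :: d) else [])) :
    d.head? = some (s.take (k+1)) := by
  split at hd
  · simp only [List.mem_map] at hd
    obtain ⟨d', _, rfl⟩ := hd
    rfl
  · simp at hd

theorem nodup_decompsF (S : List (List Char)) :
    ∀ (n : Nat) (s : List Char), s.length ≤ n → (decompsF S s).Nodup := by
  intro n
  induction n with
  | zero =>
    intro s hs
    have : s = [] := List.eq_nil_of_length_eq_zero (Nat.le_zero.mp hs)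
    subst this; rw [decompsF]; simp
  | succ n ih =>
    intro s hs
    by_cases hnil : s = []
    · subst hnil; exact ih [] (by simp)
    rw [decompsF, if_neg hnil]
    rw [List.nodup_flatMap]
    constructor
    · rintro ⟨k, hk0⟩ -
      have hk : k < s.length := List.mem_range.mp hk0
      simp only
      split
      · apply List.Nodup.map
        · intro a b hab; simpa using hab
        · exact ih _ (by simp; omega)
      · exact List.nodup_nil
    · have hnd : (List.range s.length).attach.Nodup := List.nodup_attach.mpr List.nodup_range
      apply hnd.imp
      rintro ⟨a, ha⟩ ⟨b, hb⟩ hne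
      have hab : a ≠ b := fun h => hne (Subtype.ext h)
      intro d hda hdb
      have h1 := head?_mem_decompsF_branch S s a d hda
      have h2 := head?_mem_decompsF_branch S s b d hdb
      rw [h1] at h2
      have hlen : (s.take (a+1)).length = (s.take (b+1)).length := by
        rw [Option.some_inj.mp h2]
      simp only [List.length_take] at hlen
      have ha' : a < s.length := List.mem_range.mp ha
      have hb' : b < s.length := List.mem_range.mp hb
      omega

theorem getLast?_mem_decompsL_branch (S : List (List Char)) (s : List Char) (k : Nat)
    (d : List (List Char))
    (hd : d ∈ (if s.drop (s.length - (k+1)) ∈ S then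
        (decompsL S (s.take (s.length - (k+1)))).map (fun d => d ++ [s.drop (s.length - (k+1))]) else [])) :
    d.getLast? = some (s.drop (s.length - (k+1))) := by
  split at hd
  · simp only [List.mem_map] at hd
    obtain ⟨d', _, rfl⟩ := hd
    simp
  · simp at hd

theorem nodup_decompsL (S : List (List Char)) :
    ∀ (n : Nat) (s : List Char), s.length ≤ n → (decompsL S s).Nodup := by
  intro n
  induction n with
  | zero =>
    intro s hs
    have : s = [] := List.eq_nil_of_length_eq_zero (Nat.le_zero.mp hs)
    subst this; rw [decompsL]; simp
  | succ n ih =>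
    intro s hs
    by_cases hnil : s = []
    · subst hnil; exact ih [] (by simp)
    rw [decompsL, if_neg hnil]
    rw [List.nodup_flatMap]
    constructor
    · rintro ⟨k, hk0⟩ -
      have hk : k < s.length := List.mem_range.mp hk0
      simp only
      split
      · apply List.Nodup.map
        · intro a b hab; simpa using hab
        · exact ih _ (by simp; omega)
      · exact List.nodup_nil
    · have hnd : (List.range s.length).attach.Nodup := List.nodup_attach.mpr List.nodup_range
      apply hnd.imp
      rintro ⟨a, ha⟩ ⟨b, hb⟩ hne
      have hab : a ≠ b := fun h => hne (Subtype.ext h)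
      intro d hda hdb
      have h1 := getLast?_mem_decompsL_branch S s a d hda
      have h2 := getLast?_mem_decompsL_branch S s b d hdb
      rw [h1] at h2
      have hlen : (s.drop (s.length - (a+1))).length = (s.drop (s.length - (b+1))).length := by
        rw [Option.some_inj.mp h2]
      simp only [List.length_drop] at hlen
      have ha' : a < s.length := List.mem_range.mp ha
      have hb' : b < s.length := List.mem_range.mp hb
      omega

theorem length_decompsF_eq_decompsL (S : List (List Char)) (s : List Char) :
    (decompsF S s).length = (decompsL S s).length := by
  apply List.Perm.length_eq
  rw [List.perm_ext_iff_of_nodup (nodup_decompsF S s.length s le_rfl) (nodup_decompsL S s.length s le_rfl)]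
  intro d
  rw [mem_decompsF S s.length s le_rfl, mem_decompsL S s.length s le_rfl]

-- number of ways to write s as a concatenation of towels, as the Int the programs carry
def nWays (S : List (List Char)) (s : List Char) : Int := ((decompsF S s).length : Int)

theorem nWays_nil (S : List (List Char)) : nWays S [] = 1 := by
  rw [nWays, decompsF]; simp

theorem nWays_pos_rec (S : List (List Char)) (s : List Char) (h : s ≠ []) :
    nWays S s = ((List.range s.length).map
      (fun k => if s.take (k+1) ∈ S then nWays S (s.drop (k+1)) else 0)).sum := by
  rw [nWays, decompsF, if_neg h, List.length_flatMap]
  rw [← List.attach_map_val (l := List.range s.length)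
    (f := fun k => if s.take (k+1) ∈ S then nWays S (s.drop (k+1)) else 0)]
  rw [Nat.cast_list_sum]
  apply congrArg List.sum
  rw [List.map_map]
  apply List.map_congr_left
  rintro ⟨k, hk⟩ -
  simp only [Function.comp_apply]
  split <;> simp [nWays]

theorem nWaysL_pos_rec (S : List (List Char)) (s : List Char) (h : s ≠ []) :
    ((decompsL S s).length : Int) = ((List.range s.length).map
      (fun k => if s.drop (s.length - (k+1)) ∈ S then ((decompsL S (s.take (s.length - (k+1)))).length : Int) else 0)).sum := by
  rw [decompsL, if_neg h, List.length_flatMap]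
  rw [← List.attach_map_val (l := List.range s.length)
    (f := fun k => if s.drop (s.length - (k+1)) ∈ S then ((decompsL S (s.take (s.length - (k+1)))).length : Int) else 0)]
  rw [Nat.cast_list_sum]
  apply congrArg List.sum
  rw [List.map_map]
  apply List.map_congr_left
  rintro ⟨k, hk⟩ -
  simp only [Function.comp_apply]
  split <;> simp


-- ---- trie lemmas ----
def leafAt : PTree → List Char → Bool
  | (b, _), [] => b
  | (_, n), c :: cs => (pnFind n c).elim false (fun t => leafAt t cs)
  termination_by _ w => w.length

theorem leafAt_nil (t : PTree) : leafAt t [] = t.1 := by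
  rcases t with ⟨b, n⟩; simp [leafAt]

theorem leafAt_fresh (w : List Char) : leafAt (false, .nil) w = false := by
  cases w <;> simp [leafAt, pnFind]

theorem find_put (a c : Char) (as : List Char) : ∀ (n : PNode),
    pnFind (pnPut n a as) c =
      if c = a then some (ptPut ((pnFind n a).getD (false, .nil)) as) else pnFind n c := by
  intro n
  induction n with
  | nil =>
    by_cases h : c = a
    · subst h; simp [pnPut, pnFind]
    · simp only [pnPut, pnFind, if_neg h]
      rw [if_neg (fun hh : a = c => h hh.symm)]
  | cons c' lb ln rest ihl ihr =>
    by_cases h1 : c' = a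
    · subst h1
      by_cases h2 : c' = c
      · subst h2; simp [pnPut, pnFind]
      · simp only [pnPut, pnFind, if_pos rfl, if_neg h2]
        rw [if_neg (fun hh : c = c' => h2 hh.symm)]
        simp [pnFind, h2]
    · by_cases h2 : c' = c
      · subst h2
        simp [pnPut, pnFind, h1]
      · simp [pnPut, pnFind, h1, h2, ihr]

theorem leafAt_put (x : List Char) : ∀ (t : PTree) (w : List Char),
    leafAt (ptPut t x) w = (decide (w = x) || leafAt t w) := by
  induction x with
  | nil =>
    rintro ⟨b, n⟩ w
    cases w with
    | nil => simp [ptPut, leafAt]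
    | cons c cs => simp [ptPut, leafAt]
  | cons a as ih =>
    rintro ⟨b, n⟩ w
    cases w with
    | nil => simp [ptPut, leafAt]
    | cons c cs =>
      simp only [ptPut, leafAt, find_put]
      by_cases hca : c = a
      · subst hca
        rw [if_pos rfl]
        simp only [Option.elim_some]
        rw [ih]
        cases hf : pnFind n c with
        | none => simp [hf, leafAt_fresh]
        | some t0 => simp [hf]
      · rw [if_neg hca]
        have : ¬ (c :: cs = a :: as) := by simp [hca]
        simp [this]

theorem leafAt_foldl (ts : List String) : ∀ (t0 : PTree) (w : List Char),
    leafAt (ts.foldl (fun tr t => ptPut tr t.toList) t0) w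
      = (leafAt t0 w || decide (w ∈ ts.map String.toList)) := by
  induction ts with
  | nil => intro t0 w; simp
  | cons s rest ih =>
    intro t0 w
    simp only [List.foldl_cons, ih, leafAt_put, List.map_cons, List.mem_cons]
    by_cases h : w = s.toList <;> simp [h, Bool.or_comm, Bool.or_assoc]

theorem splits_eq (v : List Char) : ∀ (t : PTree) (pre : List Char),
    ptSplits t pre v = (List.range v.length).filterMap
      (fun k => if leafAt t (v.take (k+1)) then some (pre ++ v.take (k+1), v.drop (k+1)) else none) := by
  induction v with
  | nil => rintro ⟨b, n⟩ pre; simp [ptSplits]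
  | cons c cs ih =>
    rintro ⟨b, n⟩ pre
    rw [ptSplits]
    cases hf : pnFind n c with
    | none =>
      simp only
      symm
      rw [List.eq_nil_iff_forall_not_mem]
      intro x hx
      rw [List.mem_filterMap] at hx
      obtain ⟨k, hk, hx⟩ := hx
      have : leafAt (b, n) ((c :: cs).take (k+1)) = false := by
        simp only [List.take_succ_cons, leafAt, hf, Option.elim_none]
      rw [this] at hx
      simp at hx
    | some t' =>
      simp only
      rw [ih t' (pre ++ [c])]
      simp only [List.length_cons]
      rw [List.range_succ_eq_map, List.filterMap_cons, List.filterMap_map]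
      have h0 : leafAt (b, n) ((c :: cs).take (0+1)) = t'.1 := by
        simp only [List.take_succ_cons, List.take_zero, leafAt, hf, Option.elim_some, leafAt_nil]
      rw [h0]
      have hfun : ∀ k ∈ List.range cs.length,
          ((fun k => if leafAt (b, n) ((c :: cs).take (k+1)) then
              some (pre ++ (c :: cs).take (k+1), (c :: cs).drop (k+1)) else none) ∘ Nat.succ) k
          = (fun k => if leafAt t' (cs.take (k+1)) then
              some ((pre ++ [c]) ++ cs.take (k+1), cs.drop (k+1)) else none) k := by
        intro k _
        simp only [Function.comp_apply, List.take_succ_cons, List.drop_succ_cons, leafAt, hf,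
          Option.elim_some]
        rw [List.append_cons]
      rw [List.filterMap_congr hfun]
      cases ht : t'.1 <;> simp


-- ---- generic helpers ----
theorem get?_modify' (d : PySem.Dict String Int) (k k' : String) (d0 : Int) (f : Int → Int) :
    (d.modify k d0 f).get? k' = if k' = k then some (f (d.getD k d0)) else d.get? k' := by
  rw [show d.modify k d0 f = d.insert k (f (d.getD k d0)) from rfl, PySem.Dict.get?_insert]

theorem get?_some_of_contains (d : PySem.Dict String Int) (k : String)
    (h : d.contains k = true) : ∃ v, d.get? k = some v := by
  rw [PySem.Dict.contains, List.any_eq_true] at h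
  obtain ⟨p, hp, he⟩ := h
  have hs : (d.items.find? (fun p => p.1 == k)).isSome := List.find?_isSome.mpr ⟨p, hp, he⟩
  rcases Option.isSome_iff_exists.mp hs with ⟨q, hq⟩
  exact ⟨q.2, by rw [PySem.Dict.get?, hq]; rfl⟩

theorem get?_none_of_not_contains (d : PySem.Dict String Int) (k : String)
    (h : d.contains k = false) : d.get? k = none := by
  rw [PySem.Dict.contains] at h
  rw [PySem.Dict.get?]
  rw [List.find?_eq_none.mpr ?h]
  · rfl
  · intro p hp
    intro hc
    rw [List.any_eq_false] at h
    exact absurd hc (h p hp)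

theorem sum_filterMap_if {κ : Type} (l : List Nat) (P : Nat → Bool) (e : Nat → κ) (g : κ → Int) :
    ((l.filterMap (fun k => if P k then some (e k) else none)).map g).sum
      = (l.map (fun k => if P k then g (e k) else 0)).sum := by
  induction l with
  | nil => simp
  | cons a l ih =>
    rw [List.filterMap_cons]
    cases h : P a <;> simp [h, ih]

theorem foldl_if_add (l : List Int) (P : Int → Bool) (g : Int → Int) :
    ∀ (init : Int), l.foldl (fun s L => if P L then s + g L else s) init
      = init + (l.map (fun L => if P L then g L else 0)).sum := by
  induction l with
  | nil => simp
  | cons a l ih =>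
    intro init
    cases h : P a <;> simp [h, ih, add_assoc]

theorem sum_map_filter (l : List Int) (p : Int → Bool) (g : Int → Int)
    (h : ∀ L ∈ l, p L = false → g L = 0) :
    (l.map g).sum = ((l.filter p).map g).sum := by
  induction l with
  | nil => simp
  | cons a l ih =>
    have ih' := ih (fun L hL => h L (by simp [hL]))
    cases hp : p a
    · simp [hp, ih', h a (by simp) hp]
    · simp [hp, ih']

theorem pyRange_one_natCast (n : Nat) :
    PySem.List.pyRange 1 ((n : Int) + 1) 1 = (List.range n).map (fun (k : Nat) => ((k : Int) + 1)) := by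
  induction n with
  | zero =>
    have : ¬ (1 : Int) < 1 := by omega
    simp [PySem.List.pyRange]
  | succ n ih =>
    have h1 : (1 : Int) ≤ (n : Int) + 1 := by omega
    rw [show ((n + 1 : Nat) : Int) + 1 = ((n : Int) + 1) + 1 by push_cast; ring]
    rw [PySem.List.pyRange_one_succ_right h1, ih]
    simp [List.range_succ]


-- ---- A-side: the shared Counter memo computes nWays ----
def Ginv (TS : List (List Char)) (m : PySem.Dict String Int) : Prop :=
  (∀ s v, m.get? s = some v → v = nWays TS s.toList) ∧ m.get? "" = some 1

def Abody (T : PTree) (design : String) (m : PySem.Dict String Int) (i : Int) :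
    PySem.Dict String Int :=
  let tail := PySem.Str.slice design (some (-i)) none
  if m.contains tail then m
  else (ptSplits T [] tail.toList).foldl
         (fun m2 pr => m2.modify tail 0 (fun x => x + m2.getD (String.ofList pr.2) 0)) m

theorem foldl_modify_spec (tail : String) :
    ∀ (prs : List (List Char × List Char)) (m : PySem.Dict String Int),
      (∀ pr ∈ prs, String.ofList pr.2 ≠ tail) →
      (∀ k, k ≠ tail →
        (prs.foldl (fun m2 pr => m2.modify tail 0 (fun x => x + m2.getD (String.ofList pr.2) 0)) m).get? k
          = m.get? k) ∧
      ((prs.foldl (fun m2 pr => m2.modify tail 0 (fun x => x + m2.getD (String.ofList pr.2) 0)) m).getD tail 0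
        = m.getD tail 0 + (prs.map (fun pr => m.getD (String.ofList pr.2) 0)).sum) ∧
      (prs ≠ [] →
        (prs.foldl (fun m2 pr => m2.modify tail 0 (fun x => x + m2.getD (String.ofList pr.2) 0)) m).get? tail
          = some ((prs.foldl (fun m2 pr => m2.modify tail 0 (fun x => x + m2.getD (String.ofList pr.2) 0)) m).getD tail 0)) := by
  intro prs
  induction prs with
  | nil => intro m h; refine ⟨fun k hk => rfl, by simp, fun h => absurd rfl h⟩
  | cons pr prs ih =>
    intro m h
    simp only [List.foldl_cons]
    set m1 := m.modify tail 0 (fun x => x + m.getD (String.ofList pr.2) 0) with hm1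
    have hne : String.ofList pr.2 ≠ tail := h pr (by simp)
    have hrest : ∀ q ∈ prs, String.ofList q.2 ≠ tail := fun q hq => h q (by simp [hq])
    obtain ⟨ih1, ih2, ih3⟩ := ih m1 hrest
    have hm1tail : m1.getD tail 0 = m.getD tail 0 + m.getD (String.ofList pr.2) 0 := by
      rw [hm1, PySem.Dict.getD_modify, if_pos rfl]
    have hm1o : ∀ k, k ≠ tail → m1.get? k = m.get? k := by
      intro k hk
      rw [hm1, get?_modify', if_neg hk]
    refine ⟨?_, ?_, ?_⟩
    · intro k hk; rw [ih1 k hk, hm1o k hk]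
    · rw [ih2, hm1tail]
      have : (prs.map (fun q => m1.getD (String.ofList q.2) 0)).sum
          = (prs.map (fun q => m.getD (String.ofList q.2) 0)).sum := by
        apply congrArg List.sum
        apply List.map_congr_left
        intro q hq
        rw [PySem.Dict.getD_eq_get?_getD, hm1o _ (hrest q hq), ← PySem.Dict.getD_eq_get?_getD]
      rw [this]
      simp [add_assoc]
    · intro _
      by_cases hnil : prs = []
      · subst hnil
        simp only [List.foldl_nil, hm1]
        rw [get?_modify', if_pos rfl, PySem.Dict.getD_modify, if_pos rfl,
          PySem.Dict.getD_eq_get?_getD]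
      · exact ih3 hnil

theorem tail_toList (design : String) (k : Nat) :
    (PySem.Str.slice design (some (-((k : Int) + 1))) none).toList
      = design.toList.drop (design.toList.length - (k + 1)) := by
  rw [PySem.Str.toList_slice]
  rw [PySem.Chars.slice_eq_listSlice]
  rw [show ((k : Int) + 1) = ((k + 1 : Nat) : Int) by push_cast; ring]
  exact PySem.List.slice_from_neg_natCast design.toList (k+1) (by omega)

theorem A_design (TS : List (List Char)) (T : PTree)
    (hT : ∀ w, leafAt T w = decide (w ∈ TS)) (design : String) :
    ∀ i, i ≤ design.toList.length → ∀ m, Ginv TS m →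
      Ginv TS ((List.range i).foldl (fun m (k : Nat) => Abody T design m ((k : Int)+1)) m) ∧
      ∀ j, j ≤ i →
        ((List.range i).foldl (fun m (k : Nat) => Abody T design m ((k : Int)+1)) m).getD
            (String.ofList (design.toList.drop (design.toList.length - j))) 0
          = nWays TS (design.toList.drop (design.toList.length - j)) := by
  intro i
  induction i with
  | zero =>
    intro _ m hG
    refine ⟨by simpa using hG, ?_⟩
    intro j hj
    interval_cases j
    simp only [Nat.sub_zero, List.drop_length]
    rw [show String.ofList ([] : List Char) = "" from rfl, List.range_zero, List.foldl_nil,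
      PySem.Dict.getD_eq_get?_getD, hG.2, nWays_nil]
    rfl
  | succ i ihi =>
    intro hi1 m hG
    have hi : i ≤ design.toList.length := by omega
    obtain ⟨ihG, ihval⟩ := ihi hi m hG
    set n := design.toList.length with hn
    set m1 := (List.range i).foldl (fun m (k : Nat) => Abody T design m ((k : Int)+1)) m with hm1
    rw [List.range_succ, List.foldl_append, List.foldl_cons, List.foldl_nil, ← hm1]
    set tail := PySem.Str.slice design (some (-((i : Int) + 1))) none with htail
    have htl : tail.toList = design.toList.drop (n - (i+1)) := tail_toList design i
    have htllen : tail.toList.length = i + 1 := by rw [htl, List.length_drop]; omega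
    have hkey : tail = String.ofList (design.toList.drop (n - (i+1))) := by
      rw [← htl, String.ofList_toList]
    have hkeylen : ∀ j, j ≤ i →
        String.ofList (design.toList.drop (n - j)) ≠ tail := by
      intro j hj heq
      have := congrArg (fun s => s.toList.length) heq
      simp only [String.toList_ofList, htllen, List.length_drop] at this
      omega
    rw [show Abody T design m1 ((i : Int)+1) = (if m1.contains tail then m1
      else (ptSplits T [] tail.toList).foldl
         (fun m2 pr => m2.modify tail 0 (fun x => x + m2.getD (String.ofList pr.2) 0)) m1) from rfl]
    by_cases hc : m1.contains tail = true
    · rw [if_pos hc]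
      refine ⟨ihG, ?_⟩
      intro j hj
      rcases Nat.lt_or_ge j (i+1) with hj' | hj'
      · exact ihval j (by omega)
      · have hj2 : j = i + 1 := by omega
        subst hj2
        obtain ⟨v, hv⟩ := get?_some_of_contains m1 tail hc
        have := ihG.1 tail v hv
        rw [← hkey, PySem.Dict.getD_eq_get?_getD, hv, this, htl]
        rfl
    · rw [if_neg hc]
      have hcf : m1.contains tail = false := by simpa using hc
      have hprs : ∀ pr ∈ ptSplits T [] tail.toList, String.ofList pr.2 ≠ tail := by
        intro pr hpr heq
        rw [splits_eq] at hpr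
        rw [List.mem_filterMap] at hpr
        obtain ⟨k, hk, hif⟩ := hpr
        rw [List.mem_range] at hk
        split at hif
        · cases hif
          have := congrArg (fun s => s.toList.length) heq
          simp only [String.toList_ofList, htllen, List.length_drop] at this
          omega
        · cases hif
      obtain ⟨f1, f2, f3⟩ := foldl_modify_spec tail (ptSplits T [] tail.toList) m1 hprs
      have hgd0 : m1.getD tail 0 = 0 := PySem.Dict.getD_of_not_contains m1 0 hcf
      -- the sum of memo values over the splits is nWays of the tail
      have hsum : ((ptSplits T [] tail.toList).map
            (fun pr => m1.getD (String.ofList pr.2) 0)).sum = nWays TS tail.toList := by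
        rw [splits_eq, htllen, sum_filterMap_if]
        rw [nWays_pos_rec TS tail.toList (by intro h0; rw [h0] at htllen; simp at htllen), htllen]
        apply congrArg List.sum
        apply List.map_congr_left
        intro k hk
        rw [List.mem_range] at hk
        have hdrop : tail.toList.drop (k+1) = design.toList.drop (n - (i - k)) := by
          rw [htl, List.drop_drop]
          congr 1
          omega
        rw [hT]
        by_cases hmem : tail.toList.take (k+1) ∈ TS
        · rw [if_pos (by simp [hmem]), if_pos hmem]
          simp only [List.nil_append]
          rw [hdrop, ihval (i - k) (by omega)]
        · rw [if_neg (by simp [hmem]), if_neg hmem]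
      have hvaltail :
          ((ptSplits T [] tail.toList).foldl
            (fun m2 pr => m2.modify tail 0 (fun x => x + m2.getD (String.ofList pr.2) 0)) m1).getD tail 0
          = nWays TS tail.toList := by
        rw [f2, hgd0, hsum, zero_add]
      constructor
      · constructor
        · intro s v hv
          by_cases hs : s = tail
          · subst hs
            by_cases hnil : ptSplits T [] tail.toList = []
            · rw [hnil, List.foldl_nil, get?_none_of_not_contains m1 tail hcf] at hv
              cases hv
            · rw [f3 hnil] at hv
              cases hv
              rw [hvaltail]
          · rw [f1 s hs] at hv
            exact ihG.1 s v hv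
        · have : ("" : String) ≠ tail := by
            intro heq
            have := congrArg (fun s => s.toList.length) heq
            simp only [htllen] at this
            simp at this
          rw [f1 "" this]
          exact ihG.2
      · intro j hj
        rcases Nat.lt_or_ge j (i+1) with hj' | hj'
        · have hne := hkeylen j (by omega)
          rw [PySem.Dict.getD_eq_get?_getD, f1 _ hne, ← PySem.Dict.getD_eq_get?_getD]
          exact ihval j (by omega)
        · have hj2 : j = i + 1 := by omega
          subst hj2
          rw [← hkey, hvaltail, htl]


-- ---- A-side: whole-program shape ----
theorem A_outer (TS : List (List Char)) (T : PTree)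
    (hT : ∀ w, leafAt T w = decide (w ∈ TS)) (designs : List String) :
    ∀ (total : Int) (m : PySem.Dict String Int), Ginv TS m →
      (designs.foldl (fun (acc : Int × PySem.Dict String Int) design =>
          let ways := (PySem.List.pyRange 1 (PySem.Str.len design + 1) 1).foldl
            (fun (m : PySem.Dict String Int) i =>
              let tail := PySem.Str.slice design (some (-i)) none
              if m.contains tail then m
              else (ptSplits T [] tail.toList).foldl
                     (fun m2 pr => m2.modify tail 0 (fun x => x + m2.getD (String.ofList pr.2) 0)) m)
            acc.2
          (acc.1 + ways.getD design 0, ways)) (total, m)).1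
      = total + (designs.map (fun d => nWays TS d.toList)).sum := by
  induction designs with
  | nil => intro total m _; simp
  | cons d ds ih =>
    intro total m hG
    simp only [List.foldl_cons]
    have hlen : PySem.Str.len d + 1 = ((d.toList.length : Nat) : Int) + 1 := by simp
    have hconv : ∀ (m0 : PySem.Dict String Int),
        (PySem.List.pyRange 1 (PySem.Str.len d + 1) 1).foldl
            (fun (m : PySem.Dict String Int) i =>
              let tail := PySem.Str.slice d (some (-i)) none
              if m.contains tail then m
              else (ptSplits T [] tail.toList).foldl
                     (fun m2 pr => m2.modify tail 0 (fun x => x + m2.getD (String.ofList pr.2) 0)) m)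
            m0
        = (List.range d.toList.length).foldl (fun m (k : Nat) => Abody T d m ((k : Int)+1)) m0 := by
      intro m0
      rw [hlen, pyRange_one_natCast, List.foldl_map]
      rfl
    obtain ⟨hG', hval⟩ := A_design TS T hT d d.toList.length le_rfl m hG
    have hd : ((List.range d.toList.length).foldl
        (fun m (k : Nat) => Abody T d m ((k : Int)+1)) m).getD d 0 = nWays TS d.toList := by
      have := hval d.toList.length le_rfl
      rw [Nat.sub_self, List.drop_zero, String.ofList_toList] at this
      exact this
    simp only [hconv]
    rw [ih (total + ((List.range d.toList.length).foldl
        (fun m (k : Nat) => Abody T d m ((k : Int)+1)) m).getD d 0) _ hG']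
    rw [hd, List.map_cons, List.sum_cons]
    ring

def towelListsOf (text_input : String) : List (List Char) :=
  ((PySem.Str.split? (((PySem.Str.split? text_input "\n\n").getD []).getD 0 "") ", ").getD []).map
    String.toList

set_option maxHeartbeats 2000000 in
theorem A_total (text_input : String) :
    part2 text_input
      = ((PySem.Str.split₀ (((PySem.Str.split? text_input "\n\n").getD []).getD 1 "")).map
          (fun d => nWays (towelListsOf text_input) d.toList)).sum := by
  have hT : ∀ w, leafAt
      ((((PySem.Str.split? (((PySem.Str.split? text_input "\n\n").getD []).getD 0 "") ", ").getD
        []).foldl (fun tr t => ptPut tr t.toList) ((false, .nil) : PTree))) w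
      = decide (w ∈ towelListsOf text_input) := by
    intro w
    rw [leafAt_foldl, leafAt_fresh, Bool.false_or, towelListsOf]
  have hG : Ginv (towelListsOf text_input) ((PySem.Dict.empty : PySem.Dict String Int).insert "" 1) := by
    constructor
    · intro s v hv
      rw [PySem.Dict.get?_insert] at hv
      split at hv
      · rename_i hs
        subst hs
        cases hv
        rw [show ("" : String).toList = [] by simp, nWays_nil]
      · rw [PySem.Dict.get?_empty] at hv
        cases hv
    · exact PySem.Dict.get?_insert_self _ _ _
  have h := A_outer (towelListsOf text_input) _ hT
    (PySem.Str.split₀ (((PySem.Str.split? text_input "\n\n").getD []).getD 1 ""))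
    0 ((PySem.Dict.empty : PySem.Dict String Int).insert "" 1) hG
  rw [zero_add] at h
  exact h


-- ---- B-side: the forward DP computes mWays ----
def mWays (S : List (List Char)) (s : List Char) : Int := ((decompsL S s).length : Int)

theorem nWays_eq_mWays (S : List (List Char)) (s : List Char) : nWays S s = mWays S s := by
  rw [nWays, mWays, length_decompsF_eq_decompsL]

theorem mWays_nil (S : List (List Char)) : mWays S [] = 1 := by
  rw [mWays, decompsL]; simp

def Bbody (towels : PySem.Set String) (lengths : List Int) (design : String)
    (dp : List Int) (j : Int) : List Int :=
  PySem.List.pySetD dp j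
    (lengths.foldl (fun s L =>
        if L ≤ j && PySem.Set.contains towels (PySem.Str.slice design (some (j - L)) (some j))
        then s + PySem.List.pyGetD dp (j - L) 0 else s) 0)

theorem pySetD_append_cons (a c : List Int) (b v : Int) :
    PySem.List.pySetD (a ++ b :: c) ((a.length : Int)) v = a ++ v :: c := by
  simp [PySem.List.pySetD, PySem.List.pySet?, PySem.List.pyIdx?, List.set_append]

theorem pyGetD_append_left (a c : List Int) (t : Nat) (h : t < a.length) :
    PySem.List.pyGetD (a ++ c) ((t : Int)) 0 = a[t] := by
  simp only [PySem.List.pyGetD_natCast]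
  rw [List.getD_eq_getElem?_getD, List.getElem?_append_left h]
  simp [List.getElem?_eq_getElem h]

theorem pyGetD_append_mid (a c : List Int) (b : Int) :
    PySem.List.pyGetD (a ++ b :: c) ((a.length : Int)) 0 = b := by
  simp only [PySem.List.pyGetD_natCast]
  rw [List.getD_eq_getElem?_getD, List.getElem?_append_right (by omega)]
  simp

theorem B_design (TS : List (List Char)) (towels : PySem.Set String) (lengths : List Int)
    (hmemT : ∀ s : String, towels.contains s = true ↔ s.toList ∈ TS)
    (hsur : ∀ w ∈ TS, ∃ s : String, s.toList = w ∧ towels.contains s = true)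
    (hnd : lengths.Nodup)
    (hlenmem : ∀ s : String, towels.contains s = true → PySem.Str.len s ∈ lengths)
    (hpos : ∀ L ∈ lengths, 0 ≤ L)
    (design : String) :
    ∀ j, j ≤ design.toList.length →
      (List.range j).foldl (fun dp (k : Nat) => Bbody towels lengths design dp ((k : Int)+1))
          ([1] ++ List.replicate design.toList.length 0)
        = (List.range (j+1)).map (fun t => mWays TS (design.toList.take t))
          ++ List.replicate (design.toList.length - j) 0 := by
  intro j
  induction j with
  | zero =>
    intro _
    simp [mWays_nil]
  | succ j ihj =>
    intro hj1
    have hj : j ≤ design.toList.length := by omega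
    set n := design.toList.length with hn
    set D := design.toList with hD
    rw [List.range_succ, List.foldl_append, List.foldl_cons, List.foldl_nil, ihj hj]
    set A' := (List.range (j+1)).map (fun t => mWays TS (D.take t)) with hA'
    have lenA' : A'.length = j + 1 := by simp [hA']
    have hrep : List.replicate (n - j) (0 : Int) = 0 :: List.replicate (n - (j+1)) 0 := by
      rw [show n - j = (n - (j+1)) + 1 by omega, List.replicate_succ]
    rw [hrep]
    -- the write at position j+1
    have hsetidx : ((j : Int) + 1) = ((A'.length : Nat) : Int) := by rw [lenA']; push_cast; ring
    -- abbreviations for the summed term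
    set p : Int → Bool := fun L => (decide (1 ≤ L) && decide (L ≤ (j:Int)+1)
      && decide ((D.drop (j+1 - L.toNat)).take L.toNat ∈ TS)) with hp
    set hfun : Int → Int := fun L => if p L then mWays TS (D.take (j + 1 - L.toNat)) else 0 with hh
    have hdpj : ∀ (t : Nat), t < j + 1 →
        PySem.List.pyGetD (A' ++ 0 :: List.replicate (n - (j+1)) 0) ((t : Int)) 0
          = mWays TS (D.take t) := by
      intro t ht
      rw [pyGetD_append_left _ _ t (by omega)]
      simp [hA']
    -- each summand of the inner fold equals hfun
    have hterm : ∀ L ∈ lengths,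
        (if (L ≤ (j:Int) + 1 && PySem.Set.contains towels
              (PySem.Str.slice design (some ((j:Int) + 1 - L)) (some ((j:Int) + 1))))
          then PySem.List.pyGetD (A' ++ 0 :: List.replicate (n - (j+1)) 0) ((j:Int) + 1 - L) 0 else 0)
        = hfun L := by
      intro L hL
      have h0 : 0 ≤ L := hpos L hL
      by_cases hle : L ≤ (j:Int) + 1
      · by_cases hL1 : 1 ≤ L
        · have hsub : (PySem.Str.slice design (some ((j:Int) + 1 - L)) (some ((j:Int) + 1))).toList
              = (D.drop (j + 1 - L.toNat)).take L.toNat := by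
            rw [PySem.Str.toList_slice, PySem.Chars.slice_eq_listSlice]
            rw [PySem.List.slice_toNat _ (by omega) (by omega)]
            rw [show ((j:Int) + 1 - L).toNat = j + 1 - L.toNat by omega]
            rw [show ((j:Int) + 1).toNat - (j + 1 - L.toNat) = L.toNat by omega]
          have hcont : PySem.Set.contains towels
              (PySem.Str.slice design (some ((j:Int) + 1 - L)) (some ((j:Int) + 1)))
              = decide ((D.drop (j + 1 - L.toNat)).take L.toNat ∈ TS) := by
            have hiff := hmemT (PySem.Str.slice design (some ((j:Int) + 1 - L)) (some ((j:Int) + 1)))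
            rw [hsub] at hiff
            by_cases hm : (D.drop (j + 1 - L.toNat)).take L.toNat ∈ TS
            · rw [decide_eq_true hm]
              exact hiff.mpr hm
            · rw [decide_eq_false hm]
              rw [← Bool.not_eq_true, hiff]
              exact hm
          rw [hcont]
          have hidx : ((j:Int) + 1 - L) = ((j + 1 - L.toNat : Nat) : Int) := by omega
          rw [hidx, hh]
          simp only [hp]
          by_cases hm : (D.drop (j + 1 - L.toNat)).take L.toNat ∈ TS
          · rw [hdpj _ (by omega)]
            simp [hm, hle, hL1]
          · simp [hm]
        · have hL0 : L = 0 := by omega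
          subst hL0
          rw [hh]
          simp only [hp]
          have : ((j:Int) + 1 - 0) = (((j + 1 : Nat)) : Int) := by push_cast; ring
          rw [this, show ((j + 1 : Nat) : Int) = ((A'.length : Nat) : Int) by rw [lenA'],
            pyGetD_append_mid]
          simp
      · rw [hh]
        simp only [hp]
        have h1 : decide (L ≤ (j:Int)+1) = false := by simp; omega
        rw [h1]
        simp
    -- sum over lengths = sum over 1..j+1
    have hsup : ∀ L, p L = true → ((1:Int) ≤ L ∧ L ≤ (j:Int)+1 ∧ L ∈ lengths) := by
      intro L hpl
      rw [hp] at hpl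
      simp only [Bool.and_eq_true, decide_eq_true_eq] at hpl
      obtain ⟨⟨hg1, hg2⟩, hg3⟩ := hpl
      refine ⟨hg1, hg2, ?_⟩
      obtain ⟨s0, hs0, hc0⟩ := hsur _ hg3
      have hlen0 := hlenmem s0 hc0
      have : PySem.Str.len s0 = L := by
        have h1 : s0.toList.length = L.toNat := by
          rw [hs0, List.length_take, List.length_drop]
          omega
        simp [h1]
        omega
      rwa [this] at hlen0
    set rangeInts := (List.range (j+1)).map (fun (k : Nat) => ((k : Int) + 1)) with hri
    have hriMem : ∀ L : Int, L ∈ rangeInts ↔ (1 ≤ L ∧ L ≤ (j:Int) + 1) := by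
      intro L
      rw [hri, List.mem_map]
      constructor
      · rintro ⟨k, hk, rfl⟩
        rw [List.mem_range] at hk
        omega
      · rintro ⟨hg1, hg2⟩
        exact ⟨(L - 1).toNat, List.mem_range.mpr (by omega), by omega⟩
    have hriNodup : rangeInts.Nodup := by
      rw [hri]
      exact (List.nodup_range).map (fun a b hab => by omega)
    have hperm : List.Perm (lengths.filter p) (rangeInts.filter p) := by
      rw [List.perm_ext_iff_of_nodup (hnd.filter p) (hriNodup.filter p)]
      intro L
      rw [List.mem_filter, List.mem_filter]
      constructor
      · rintro ⟨hmem, hpl⟩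
        exact ⟨(hriMem L).mpr ⟨(hsup L hpl).1, (hsup L hpl).2.1⟩, hpl⟩
      · rintro ⟨hmem, hpl⟩
        exact ⟨(hsup L hpl).2.2, hpl⟩
    have hsum1 : (lengths.map hfun).sum = (rangeInts.map hfun).sum := by
      rw [sum_map_filter lengths p hfun (by intro L hL hpf; rw [hh]; simp [hpf])]
      rw [sum_map_filter rangeInts p hfun (by intro L hL hpf; rw [hh]; simp [hpf])]
      exact (hperm.map hfun).sum_eq
    -- the target value by the last-piece recurrence
    have htake_len : (D.take (j+1)).length = j + 1 := by
      rw [List.length_take]; omega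
    have hrhs : mWays TS (D.take (j+1)) = (rangeInts.map hfun).sum := by
      rw [mWays]
      rw [nWaysL_pos_rec TS (D.take (j+1)) (by
        intro h0
        have := congrArg List.length h0
        rw [htake_len] at this
        simp at this)]
      rw [htake_len, hri, List.map_map]
      apply congrArg List.sum
      apply List.map_congr_left
      intro k hk
      rw [List.mem_range] at hk
      have e1 : (D.take (j+1)).drop (j + 1 - (k+1)) = (D.drop (j - k)).take (k+1) := by
        rw [List.drop_take]
        rw [show j + 1 - (k + 1) = j - k from by omega]
        rw [show j + 1 - (j - k) = k + 1 from by omega]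
      have e2 : (D.take (j+1)).take (j + 1 - (k+1)) = D.take (j - k) := by
        rw [List.take_take]
        rw [show min (j + 1 - (k+1)) (j+1) = j - k from by omega]
      simp only [Function.comp_apply]
      rw [e1, e2, hh]
      simp only [hp]
      have t1 : decide ((1:Int) ≤ (k:Int) + 1) = true := by
        simp only [decide_eq_true_eq]; omega
      have t2 : decide ((k:Int) + 1 ≤ (j:Int) + 1) = true := by
        simp only [decide_eq_true_eq]; omega
      have t3 : ((k:Int) + 1).toNat = k + 1 := by omega
      rw [t1, t2, t3]
      rw [show j + 1 - (k + 1) = j - k from by omega]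
      by_cases hm : (D.drop (j - k)).take (k+1) ∈ TS
      · simp [hm, mWays]
      · simp [hm]
    -- put it together
    rw [show Bbody towels lengths design (A' ++ 0 :: List.replicate (n - (j+1)) 0) ((j:Int)+1)
        = PySem.List.pySetD (A' ++ 0 :: List.replicate (n - (j+1)) 0) ((j:Int)+1)
          (lengths.foldl (fun s L =>
            if L ≤ (j:Int)+1 && PySem.Set.contains towels
                (PySem.Str.slice design (some ((j:Int)+1 - L)) (some ((j:Int)+1)))
            then s + PySem.List.pyGetD (A' ++ 0 :: List.replicate (n - (j+1)) 0) ((j:Int)+1 - L) 0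
            else s) 0) from rfl]
    rw [foldl_if_add lengths _ _ 0, zero_add]
    rw [List.map_congr_left hterm, hsum1, ← hrhs]
    rw [hsetidx, pySetD_append_cons]
    rw [List.range_succ, List.map_append]
    simp only [List.map_cons, List.map_nil, ← hD]
    rw [List.append_cons A' _ (List.replicate (n - (j+1)) 0)]


-- ---- B-side: whole-program shape ----
theorem B_outer (TS : List (List Char)) (towels : PySem.Set String) (lengths : List Int)
    (hmemT : ∀ s : String, towels.contains s = true ↔ s.toList ∈ TS)
    (hsur : ∀ w ∈ TS, ∃ s : String, s.toList = w ∧ towels.contains s = true)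
    (hnd : lengths.Nodup)
    (hlenmem : ∀ s : String, towels.contains s = true → PySem.Str.len s ∈ lengths)
    (hpos : ∀ L ∈ lengths, 0 ≤ L)
    (designs : List String) :
    ∀ total : Int,
      designs.foldl (fun total design =>
        let n := PySem.Str.len design
        let dp : List Int := [1] ++ List.replicate n.toNat 0
        let dp := (PySem.List.pyRange 1 (n + 1) 1).foldl (fun dp j =>
            PySem.List.pySetD dp j
              (lengths.foldl (fun s L =>
                  if L ≤ j && PySem.Set.contains towels (PySem.Str.slice design (some (j - L)) (some j))
                  then s + PySem.List.pyGetD dp (j - L) 0 else s) 0)) dp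
        total + PySem.List.pyGetD dp n 0) total
      = total + (designs.map (fun d => mWays TS d.toList)).sum := by
  induction designs with
  | nil => intro total; simp
  | cons d ds ih =>
    intro total
    simp only [List.foldl_cons]
    have hlen : PySem.Str.len d = ((d.toList.length : Nat) : Int) := by simp
    have htonat : (PySem.Str.len d).toNat = d.toList.length := by rw [hlen]; omega
    have hconv : (PySem.List.pyRange 1 (PySem.Str.len d + 1) 1).foldl (fun dp j =>
            PySem.List.pySetD dp j
              (lengths.foldl (fun s L =>
                  if L ≤ j && PySem.Set.contains towels (PySem.Str.slice d (some (j - L)) (some j))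
                  then s + PySem.List.pyGetD dp (j - L) 0 else s) 0))
          ([1] ++ List.replicate (PySem.Str.len d).toNat 0)
        = (List.range d.toList.length).foldl
            (fun dp (k : Nat) => Bbody towels lengths d dp ((k : Int)+1))
            ([1] ++ List.replicate d.toList.length 0) := by
      rw [htonat, hlen, pyRange_one_natCast, List.foldl_map]
      rfl
    have hdp := B_design TS towels lengths hmemT hsur hnd hlenmem hpos d
      d.toList.length le_rfl
    have hval : PySem.List.pyGetD ((List.range d.toList.length).foldl
          (fun dp (k : Nat) => Bbody towels lengths d dp ((k : Int)+1))
          ([1] ++ List.replicate d.toList.length 0)) (PySem.Str.len d) 0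
        = mWays TS d.toList := by
      rw [hdp, hlen, Nat.sub_self, List.replicate_zero, List.append_nil]
      rw [PySem.List.pyGetD_natCast, List.getD_eq_getElem?_getD, List.getElem?_map,
        List.getElem?_range (by omega : d.toList.length < d.toList.length + 1)]
      rw [Option.map_some, Option.getD_some, List.take_length]
    rw [hconv, hval, ih]
    rw [List.map_cons, List.sum_cons]
    ring


set_option maxHeartbeats 2000000 in
theorem B_total (text_input : String) :
    part2_alt text_input
      = ((PySem.Str.split₀ (((PySem.Str.split? text_input "\n\n").getD []).getD 1 "")).map
          (fun d => mWays (towelListsOf text_input) d.toList)).sum := by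
  have hinj : ∀ (a b : String), a.toList = b.toList → a = b := fun a b h => String.toList_inj.mp h
  have hmemT : ∀ s : String,
      (PySem.Set.ofList ((PySem.Str.split? (((PySem.Str.split? text_input "\n\n").getD []).getD 0 "") ", ").getD [])).contains s = true
        ↔ s.toList ∈ towelListsOf text_input := by
    intro s
    rw [PySem.Set.contains_iff, PySem.Set.mem_ofList, towelListsOf]
    constructor
    · intro hs; exact List.mem_map_of_mem hs
    · intro hs
      obtain ⟨t, ht, hts⟩ := List.mem_map.mp hs
      rwa [hinj t s hts] at ht
  have hsur : ∀ w ∈ towelListsOf text_input, ∃ s : String, s.toList = w ∧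
      (PySem.Set.ofList ((PySem.Str.split? (((PySem.Str.split? text_input "\n\n").getD []).getD 0 "") ", ").getD [])).contains s = true := by
    intro w hw
    obtain ⟨t, ht, rfl⟩ := List.mem_map.mp hw
    exact ⟨t, rfl, (hmemT t).mpr (List.mem_map_of_mem ht)⟩
  have hnd : (PySem.List.sorted (PySem.Set.ofList
      ((PySem.Set.ofList ((PySem.Str.split? (((PySem.Str.split? text_input "\n\n").getD []).getD 0 "") ", ").getD [])).map
        (fun t => PySem.Str.len t))) (fun L => L)).Nodup := by
    exact (PySem.List.sorted_perm _ _ _).nodup_iff.mpr (PySem.Set.nodup_ofList _)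
  have hlenmem : ∀ s : String,
      (PySem.Set.ofList ((PySem.Str.split? (((PySem.Str.split? text_input "\n\n").getD []).getD 0 "") ", ").getD [])).contains s = true →
      PySem.Str.len s ∈ PySem.List.sorted (PySem.Set.ofList
        ((PySem.Set.ofList ((PySem.Str.split? (((PySem.Str.split? text_input "\n\n").getD []).getD 0 "") ", ").getD [])).map
          (fun t => PySem.Str.len t))) (fun L => L) := by
    intro s hc
    rw [(PySem.List.sorted_perm _ _ _).mem_iff, PySem.Set.mem_ofList]
    exact List.mem_map_of_mem ((PySem.Set.contains_iff _ _).mp hc)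
  have hpos : ∀ L ∈ PySem.List.sorted (PySem.Set.ofList
      ((PySem.Set.ofList ((PySem.Str.split? (((PySem.Str.split? text_input "\n\n").getD []).getD 0 "") ", ").getD [])).map
        (fun t => PySem.Str.len t))) (fun L => L), (0:Int) ≤ L := by
    intro L hL
    rw [(PySem.List.sorted_perm _ _ _).mem_iff, PySem.Set.mem_ofList] at hL
    obtain ⟨t, _, rfl⟩ := List.mem_map.mp hL
    rw [show PySem.Str.len t = ((t.toList.length : Nat) : Int) by simp]
    omega
  have h := B_outer (towelListsOf text_input) _ _ hmemT hsur hnd hlenmem hpos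
    (PySem.Str.split₀ (((PySem.Str.split? text_input "\n\n").getD []).getD 1 "")) 0
  rw [zero_add] at h
  exact h

theorem part2_eq_alt (text_input : String) : part2 text_input = part2_alt text_input := by
  rw [A_total, B_total]
  apply congrArg List.sum
  apply List.map_congr_left
  intro d _
  exact nWays_eq_mWays _ _

-- ===== VERDICT (by name: the statement is the Claim_ definition above) =====
theorem part2_spec : Claim_equal_part2 := by
  intro text_input _ _
  show part2 text_input = part2_alt text_input
  exact part2_eq_alt text_input
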